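-- pv_equiv track=rewrite | github.com/stefanmehren/csa-capstone | script.py | track_and_pickup
-- ===== SOURCE A (Python) =====
-- def track_and_pickup(path, grid):
--     #Yep. The numbered grid again...
--     numbered_grid = []
--     tracker = 0
--     for row in grid:
--       lst = []
--       for cell in row:
--         lst.append(tracker)
--         tracker += 1
--       numbered_grid.append(lst)
--
--     #Collecting swag and 'dotting' our path
--     swag_list = []
--     i = 0
--     for row in grid:
--       j = 0
--       for cell in row:
--         if cell != 'wall' and cell != 'empty' and cell != 'start' and cell != 'end' and numbered_grid[i][j] in path:
--           swag_list.append(grid[i][j])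
--         if cell != 'wall' and cell != 'start' and cell != 'end' and numbered_grid[i][j] in path:
--           grid[i][j] = '.'
--         j += 1
--       i += 1
--     return(swag_list, grid)
-- ===== SOURCE B (Python) =====
-- def _locate(n, grid):
--     # find (row, col) of cell number n by walking row lengths; None if out of range
--     i = 0
--     for row in grid:
--         if n < len(row):
--             return (i, n)
--         n -= len(row)
--         i += 1
--     return None
--
-- def track_and_pickup(path, grid):
--     # path-driven: visit only the (deduplicated, ascending) path cell numbers
--     swag_list = []
--     for n in sorted(set(path)):
--         if n >= 0:
--             loc = _locate(n, grid)
--             if loc is not None: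
--                 i, j = loc
--                 cell = grid[i][j]
--                 if cell != 'wall' and cell != 'empty' and cell != 'start' and cell != 'end':
--                     swag_list.append(cell)
--                 if cell != 'wall' and cell != 'start' and cell != 'end':
--                     grid[i][j] = '.'
--     return (swag_list, grid)
-- ===== Notes on version B (the rewrite author's own statement) =====
-- stated objective: faster
-- what changed: Instead of numbering every grid cell and scanning the whole grid testing membership of each cell number in path, B iterates over sorted(set(path)) and locates each in-range cell number directly via cumulative row lengths, touching only path cells.
import Mathlib
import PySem

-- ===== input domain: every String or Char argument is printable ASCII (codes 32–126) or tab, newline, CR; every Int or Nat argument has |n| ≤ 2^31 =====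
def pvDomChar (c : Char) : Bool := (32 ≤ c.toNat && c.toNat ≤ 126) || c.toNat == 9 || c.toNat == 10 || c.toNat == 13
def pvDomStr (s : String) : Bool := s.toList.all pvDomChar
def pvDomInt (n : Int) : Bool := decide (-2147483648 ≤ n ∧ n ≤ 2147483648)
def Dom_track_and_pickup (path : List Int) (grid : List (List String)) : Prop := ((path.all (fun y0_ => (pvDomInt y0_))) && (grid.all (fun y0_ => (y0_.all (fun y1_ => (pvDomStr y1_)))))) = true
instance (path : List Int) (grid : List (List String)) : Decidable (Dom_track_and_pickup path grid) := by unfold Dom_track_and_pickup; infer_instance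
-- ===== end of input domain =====

-- B replaces A's full-grid scan (membership test of every cell number in path) by a path-driven pass:
-- iterate sorted(set(path)) and locate each in-range cell number via cumulative row lengths.
-- Python A and B both mutate `grid` in place (identically); the equivalence proved here is about the returned pair.

-- the two cell predicates both Python versions use, verbatim
def isSwag (c : String) : Bool := c != "wall" && c != "empty" && c != "start" && c != "end"
def isDot (c : String) : Bool := c != "wall" && c != "start" && c != "end"

-- ===== PORT A =====
-- Python mutates grid[i][j] only after reading cell (i,j) and never re-reads a written cell,
-- so rebuilding each row left-to-right from the original cells is exact.
def track_and_pickup (path : List Int) (grid : List (List String)) : List String × List (List String) :=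
  -- numbered_grid: consecutive cell numbers row by row, tracker threaded through the folds
  let numbered : List (List Int) :=
    (grid.foldl
      (fun (acc : List (List Int) × Int) row =>
        let inner := row.foldl (fun (p : List Int × Int) _cell => (p.1 ++ [p.2], p.2 + 1)) (([] : List Int), acc.2)
        (acc.1 ++ [inner.1], inner.2))
      (([] : List (List Int)), (0 : Int))).1
  -- collecting swag and dotting the path (i, j are realised positionally by zipping each row with its numbered row)
  (grid.zip numbered).foldl
    (fun (st : List String × List (List String)) rn =>
      let inner := (rn.1.zip rn.2).foldl
        (fun (st2 : List String × List String) cn =>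
          (if isSwag cn.1 && path.contains cn.2 then st2.1 ++ [cn.1] else st2.1,
           st2.2 ++ [if isDot cn.1 && path.contains cn.2 then "." else cn.1]))
        (st.1, ([] : List String))
      (inner.1, st.2 ++ [inner.2]))
    (([] : List String), ([] : List (List String)))

-- ===== PORT B =====
-- _locate: walk row lengths; (row index, remaining offset) of cell number n, none if past the end
def locateCell (n : Int) : List (List String) → Option (Int × Int)
  | [] => none
  | r :: rs =>
    if n < (r.length : Int) then some (0, n)
    else (locateCell (n - r.length) rs).map (fun ij => (ij.1 + 1, ij.2))

-- body of B's loop over one path number (indices from locateCell are nonnegative, so .toNat is exact)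
def pickStep (st : List String × List (List String)) (n : Int) : List String × List (List String) :=
  if 0 ≤ n then
    match locateCell n st.2 with
    | none => st
    | some (i, j) =>
      match PySem.List.pyGet? st.2 i with
      | none => st          -- unreachable: locateCell returns an in-range row index
      | some row =>
        match PySem.List.pyGet? row j with
        | none => st        -- unreachable: j is in range of that row
        | some cell =>
          ((if isSwag cell then st.1 ++ [cell] else st.1),
           (if isDot cell then st.2.set i.toNat (row.set j.toNat ".") else st.2))
  else st

def track_and_pickup_alt (path : List Int) (grid : List (List String)) : List String × List (List String) :=
  (PySem.List.sorted (PySem.Set.ofList path) (fun x => x)).foldl pickStep (([] : List String), grid)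

-- ===== PRECONDITION & SPEC =====
def Spec_track_and_pickup (path : List Int) (grid : List (List String)) (out : List String × List (List String)) : Prop := out = track_and_pickup_alt path grid
instance (path : List Int) (grid : List (List String)) (out : List String × List (List String)) : Decidable (Spec_track_and_pickup path grid out) := by unfold Spec_track_and_pickup; infer_instance

-- ===== CLAIM (what is proved, stated in full; the proofs are below) =====
def Claim_equal_track_and_pickup : Prop := ∀ (path : List Int) (grid : List (List String)), Dom_track_and_pickup path grid → Spec_track_and_pickup path grid (track_and_pickup path grid)

-- ===== LEMMAS AND PROOFS =====

-- canonical description both ports are reduced to: P decides which absolute cell numbers are on the path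
def collectRow (P : Int → Bool) (t : Int) : List String → List String
  | [] => []
  | c :: cs => (if isSwag c && P t then [c] else []) ++ collectRow P (t + 1) cs

def markRow (P : Int → Bool) (t : Int) : List String → List String
  | [] => []
  | c :: cs => (if isDot c && P t then "." else c) :: markRow P (t + 1) cs

def collectAll (P : Int → Bool) (t : Int) : List (List String) → List String
  | [] => []
  | r :: rs => collectRow P t r ++ collectAll P (t + r.length) rs

def markAll (P : Int → Bool) (t : Int) : List (List String) → List (List String)
  | [] => []
  | r :: rs => markRow P t r :: markAll P (t + r.length) rs

lemma markRow_length (P : Int → Bool) (t : Int) (r : List String) :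
    (markRow P t r).length = r.length := by
  induction r generalizing t with
  | nil => rfl
  | cons c cs ih => simp [markRow, ih]

lemma collectRow_congr (P Q : Int → Bool) (r : List String) :
    ∀ t : Int, (∀ n, t ≤ n → n < t + r.length → P n = Q n) →
    collectRow P t r = collectRow Q t r := by
  induction r with
  | nil => intro t _; rfl
  | cons c cs ih =>
    intro t h
    simp only [collectRow]
    rw [h t (le_refl t) (by simp), ih (t + 1) (fun n h1 h2 => h n (by omega) (by simp at h2 ⊢; omega))]

lemma markRow_congr (P Q : Int → Bool) (r : List String) :
    ∀ t : Int, (∀ n, t ≤ n → n < t + r.length → P n = Q n) →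
    markRow P t r = markRow Q t r := by
  induction r with
  | nil => intro t _; rfl
  | cons c cs ih =>
    intro t h
    simp only [markRow]
    rw [h t (le_refl t) (by simp), ih (t + 1) (fun n h1 h2 => h n (by omega) (by simp at h2 ⊢; omega))]

lemma collectAll_congr (P Q : Int → Bool) (rows : List (List String)) :
    ∀ t : Int, (∀ n, t ≤ n → P n = Q n) →
    collectAll P t rows = collectAll Q t rows := by
  induction rows with
  | nil => intro t _; rfl
  | cons r rs ih =>
    intro t h
    simp only [collectAll]
    rw [collectRow_congr P Q r t (fun n h1 _ => h n h1), ih (t + r.length) (fun n h1 => h n (by omega))]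

lemma markAll_congr (P Q : Int → Bool) (rows : List (List String)) :
    ∀ t : Int, (∀ n, t ≤ n → P n = Q n) →
    markAll P t rows = markAll Q t rows := by
  induction rows with
  | nil => intro t _; rfl
  | cons r rs ih =>
    intro t h
    simp only [markAll]
    rw [markRow_congr P Q r t (fun n h1 _ => h n h1), ih (t + r.length) (fun n h1 => h n (by omega))]

lemma collectRow_of_false (P : Int → Bool) (r : List String) :
    ∀ t : Int, (∀ n, P n = false) → collectRow P t r = [] := by
  induction r with
  | nil => intro t _; rfl
  | cons c cs ih => intro t h; simp [collectRow, h, ih (t + 1) h]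

lemma markRow_of_false (P : Int → Bool) (r : List String) :
    ∀ t : Int, (∀ n, P n = false) → markRow P t r = r := by
  induction r with
  | nil => intro t _; rfl
  | cons c cs ih => intro t h; simp [markRow, h, ih (t + 1) h]

lemma collectAll_shift (P : Int → Bool) (s : Int) (rows : List (List String)) :
    ∀ t : Int, collectAll P (t + s) rows = collectAll (fun m => P (m + s)) t rows := by
  have hrow : ∀ (r : List String) (t : Int), collectRow P (t + s) r = collectRow (fun m => P (m + s)) t r := by
    intro r
    induction r with
    | nil => intro t; rfl
    | cons c cs ih => intro t; simp only [collectRow]; rw [show t + s + 1 = (t + 1) + s by ring, ih (t + 1)]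
  intro t
  induction rows generalizing t with
  | nil => rfl
  | cons r rs ih =>
    simp only [collectAll]
    rw [hrow r t, show t + s + (r.length : Int) = (t + r.length) + s by ring, ih (t + r.length)]

lemma markAll_shift (P : Int → Bool) (s : Int) (rows : List (List String)) :
    ∀ t : Int, markAll P (t + s) rows = markAll (fun m => P (m + s)) t rows := by
  have hrow : ∀ (r : List String) (t : Int), markRow P (t + s) r = markRow (fun m => P (m + s)) t r := by
    intro r
    induction r with
    | nil => intro t; rfl
    | cons c cs ih => intro t; simp only [markRow]; rw [show t + s + 1 = (t + 1) + s by ring, ih (t + 1)]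
  intro t
  induction rows generalizing t with
  | nil => rfl
  | cons r rs ih =>
    simp only [markAll]
    rw [hrow r t, show t + s + (r.length : Int) = (t + r.length) + s by ring, ih (t + r.length)]

-- Bool contains respects set-equality
lemma contains_eq_contains (l₁ l₂ : List Int) (a b : Int) (h : a ∈ l₁ ↔ b ∈ l₂) :
    l₁.contains a = l₂.contains b := by
  by_cases hm : a ∈ l₁
  · simp [hm, h.mp hm]
  · simp [hm]
    exact fun hc => hm (h.mpr hc)

-- ---------- A-side characterisation ----------

def numRow (t : Int) : Nat → List Int
  | 0 => []
  | n + 1 => t :: numRow (t + 1) n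

def numRows (t : Int) : List (List String) → List (List Int)
  | [] => []
  | r :: rs => numRow t r.length :: numRows (t + r.length) rs

lemma numRow_succ (t : Int) (n : Nat) : numRow t (n + 1) = t :: numRow (t + 1) n := rfl

def sumLen : List (List String) → Int
  | [] => 0
  | r :: rs => (r.length : Int) + sumLen rs

lemma build_inner (row : List String) :
    ∀ (acc : List Int) (t : Int),
    row.foldl (fun (p : List Int × Int) _cell => (p.1 ++ [p.2], p.2 + 1)) (acc, t)
      = (acc ++ numRow t row.length, t + row.length) := by
  induction row with
  | nil => intro acc t; simp [numRow]
  | cons c cs ih =>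
    intro acc t
    simp only [List.foldl_cons]
    rw [ih (acc ++ [t]) (t + 1)]
    simp only [List.length_cons, numRow_succ, List.append_assoc, List.singleton_append]
    exact Prod.ext rfl (by push_cast; ring)

lemma build_outer (rows : List (List String)) :
    ∀ (acc : List (List Int)) (t : Int),
    rows.foldl
      (fun (acc : List (List Int) × Int) row =>
        let inner := row.foldl (fun (p : List Int × Int) _cell => (p.1 ++ [p.2], p.2 + 1)) (([] : List Int), acc.2)
        (acc.1 ++ [inner.1], inner.2))
      (acc, t)
      = (acc ++ numRows t rows, t + sumLen rows) := by
  induction rows with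
  | nil => intro acc t; simp [numRows, sumLen]
  | cons r rs ih =>
    intro acc t
    simp only [List.foldl_cons]
    rw [build_inner r [] t]
    simp only [List.nil_append]
    rw [ih (acc ++ [numRow t r.length]) (t + r.length)]
    simp only [numRows, sumLen, List.append_assoc, List.singleton_append]
    exact Prod.ext rfl (by ring)

lemma consume_inner (path : List Int) (r : List String) :
    ∀ (t : Int) (sw acc : List String),
    (r.zip (numRow t r.length)).foldl
      (fun (st2 : List String × List String) cn =>
        (if isSwag cn.1 && path.contains cn.2 then st2.1 ++ [cn.1] else st2.1,
         st2.2 ++ [if isDot cn.1 && path.contains cn.2 then "." else cn.1]))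
      (sw, acc)
      = (sw ++ collectRow (fun n => path.contains n) t r,
         acc ++ markRow (fun n => path.contains n) t r) := by
  induction r with
  | nil => intro t sw acc; simp [numRow, collectRow, markRow]
  | cons c cs ih =>
    intro t sw acc
    simp only [List.length_cons, numRow_succ, List.zip_cons_cons, List.foldl_cons]
    rw [ih (t + 1)]
    simp only [collectRow, markRow]
    by_cases hm : t ∈ path <;> by_cases hs : isSwag c = true <;> by_cases hd : isDot c = true <;>
      simp [hm, hs, hd, List.append_assoc]

lemma consume_outer (path : List Int) (rows : List (List String)) :
    ∀ (t : Int) (sw : List String) (acc : List (List String)),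
    (rows.zip (numRows t rows)).foldl
      (fun (st : List String × List (List String)) rn =>
        let inner := (rn.1.zip rn.2).foldl
          (fun (st2 : List String × List String) cn =>
            (if isSwag cn.1 && path.contains cn.2 then st2.1 ++ [cn.1] else st2.1,
             st2.2 ++ [if isDot cn.1 && path.contains cn.2 then "." else cn.1]))
          (st.1, ([] : List String))
        (inner.1, st.2 ++ [inner.2]))
      (sw, acc)
      = (sw ++ collectAll (fun n => path.contains n) t rows,
         acc ++ markAll (fun n => path.contains n) t rows) := by
  induction rows with
  | nil => intro t sw acc; simp [numRows, collectAll, markAll]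
  | cons r rs ih =>
    intro t sw acc
    simp only [numRows, List.zip_cons_cons, List.foldl_cons]
    rw [consume_inner path r t sw []]
    simp only [List.nil_append]
    rw [ih (t + r.length)]
    simp [collectAll, markAll, List.append_assoc]

lemma A_char (path : List Int) (grid : List (List String)) :
    track_and_pickup path grid
      = (collectAll (fun n => path.contains n) 0 grid, markAll (fun n => path.contains n) 0 grid) := by
  unfold track_and_pickup
  rw [build_outer grid [] 0]
  simp only [List.nil_append]
  rw [consume_outer path grid 0 [] []]
  simp

-- ---------- B-side characterisation ----------

lemma locateCell_fst_nonneg (g : List (List String)) :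
    ∀ n i j, locateCell n g = some (i, j) → 0 ≤ i := by
  induction g with
  | nil => intro n i j h; simp [locateCell] at h
  | cons r rs ih =>
    intro n i j h
    simp only [locateCell] at h
    split at h
    · simp at h; omega
    · cases hl : locateCell (n - r.length) rs with
      | none => rw [hl] at h; simp at h
      | some ij =>
        rw [hl] at h
        simp at h
        have := ih (n - r.length) ij.1 ij.2 (by rw [hl])
        omega

lemma foldl_pickStep_nil (ns : List Int) : ∀ sw : List String,
    List.foldl pickStep (sw, ([] : List (List String))) ns = (sw, []) := by
  induction ns with
  | nil => intro sw; rfl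
  | cons n ns ih =>
    intro sw
    simp only [List.foldl_cons]
    have : pickStep (sw, ([] : List (List String))) n = (sw, []) := by
      unfold pickStep
      split <;> simp [locateCell]
    rw [this, ih]

lemma pickStep_neg (st : List String × List (List String)) (n : Int) (h : n < 0) :
    pickStep st n = st := by
  unfold pickStep
  rw [if_neg (by omega)]

lemma foldl_pickStep_all_neg (ns : List Int) :
    ∀ st, (∀ n ∈ ns, n < 0) → List.foldl pickStep st ns = st := by
  induction ns with
  | nil => intro st _; rfl
  | cons n ns ih =>
    intro st h
    simp only [List.foldl_cons]
    rw [pickStep_neg st n (h n (by simp)), ih st (fun m hm => h m (by simp [hm]))]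

lemma pickStep_tail (sw : List String) (r : List String) (rs : List (List String)) (n : Int)
    (h : (r.length : Int) ≤ n) :
    pickStep (sw, r :: rs) n
      = ((pickStep (sw, rs) (n - r.length)).1, r :: (pickStep (sw, rs) (n - r.length)).2) := by
  have h0 : (0 : Int) ≤ n := le_trans (Int.natCast_nonneg _) h
  unfold pickStep
  rw [if_pos h0, if_pos (by omega : (0 : Int) ≤ n - r.length)]
  simp only [locateCell]
  rw [if_neg (by omega)]
  cases hl : locateCell (n - r.length) rs with
  | none => simp
  | some ij =>
    obtain ⟨i, j⟩ := ij
    have hi : 0 ≤ i := locateCell_fst_nonneg rs _ _ _ hl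
    simp only [Option.map_some]
    have hg1 : PySem.List.pyGet? (r :: rs) (i + 1) = (r :: rs)[(i + 1).toNat]? :=
      PySem.List.pyGet?_of_nonneg _ (by omega)
    have hg2 : PySem.List.pyGet? rs i = rs[i.toNat]? := PySem.List.pyGet?_of_nonneg _ hi
    have hget : PySem.List.pyGet? (r :: rs) (i + 1) = PySem.List.pyGet? rs i := by
      rw [hg1, hg2, show (i + 1).toNat = i.toNat + 1 by omega, List.getElem?_cons_succ]
    rw [hget]
    cases hrow : PySem.List.pyGet? rs i with
    | none => rfl
    | some row =>
      dsimp only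
      cases hcell : PySem.List.pyGet? row j with
      | none => rfl
      | some cell =>
        have hset : (i + 1).toNat = i.toNat + 1 := by omega
        by_cases hd : isDot cell = true <;> by_cases hs : isSwag cell = true <;>
          simp [hd, hs, hset, List.set_cons_succ]

lemma foldl_pickStep_tail (ns : List Int) :
    ∀ (sw : List String) (r : List String) (rs : List (List String)),
    (∀ n ∈ ns, (r.length : Int) ≤ n) →
    List.foldl pickStep (sw, r :: rs) ns
      = ((List.foldl pickStep (sw, rs) (ns.map (fun n => n - r.length))).1,
         r :: (List.foldl pickStep (sw, rs) (ns.map (fun n => n - r.length))).2) := by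
  induction ns with
  | nil => intro sw r rs _; rfl
  | cons n ns ih =>
    intro sw r rs h
    simp only [List.foldl_cons, List.map_cons]
    rw [pickStep_tail sw r rs n (h n (by simp))]
    exact ih (pickStep (sw, rs) (n - r.length)).1 r (pickStep (sw, rs) (n - r.length)).2
      (fun m hm => h m (by simp [hm]))

-- B's effect of one row's worth of path numbers on the current row
def procRow (t : Int) (sw cur : List String) : List Int → List String × List String
  | [] => (sw, cur)
  | n :: ns =>
    procRow t
      (if isSwag (cur.getD (n - t).toNat "") then sw ++ [cur.getD (n - t).toNat ""] else sw)
      (if isDot (cur.getD (n - t).toNat "") then cur.set (n - t).toNat "." else cur) ns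

lemma foldl_pickStep_row (ns : List Int) :
    ∀ (sw cur : List String) (rs : List (List String)),
    ns.Pairwise (· < ·) → (∀ n ∈ ns, 0 ≤ n ∧ n < (cur.length : Int)) →
    List.foldl pickStep (sw, cur :: rs) ns
      = ((procRow 0 sw cur ns).1, (procRow 0 sw cur ns).2 :: rs) := by
  induction ns with
  | nil => intro sw cur rs _ _; rfl
  | cons n ns ih =>
    intro sw cur rs hp hb
    obtain ⟨hn0, hnlen⟩ := hb n (by simp)
    have hlt : n.toNat < cur.length := by omega
    have hstep : pickStep (sw, cur :: rs) n
        = ((if isSwag (cur.getD n.toNat "") then sw ++ [cur.getD n.toNat ""] else sw),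
           (if isDot (cur.getD n.toNat "") then cur.set n.toNat "." else cur) :: rs) := by
      have e1 : PySem.List.pyGet? cur n = some (cur.getD n.toNat "") := by
        have e0 : PySem.List.pyGet? cur n = cur[n.toNat]? := PySem.List.pyGet?_of_nonneg _ hn0
        rw [e0, List.getElem?_eq_getElem hlt, List.getD_eq_getElem cur "" hlt]
      by_cases hd : isDot (cur.getD n.toNat "") = true <;>
        by_cases hs : isSwag (cur.getD n.toNat "") = true <;>
          simp [pickStep, locateCell, hn0, hnlen, PySem.List.pyGet?_zero_cons, e1, hd, hs] <;>
            (try (split <;> rfl))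
    simp only [List.foldl_cons]
    rw [hstep]
    have hlen : (if isDot (cur.getD n.toNat "") then cur.set n.toNat "." else cur).length = cur.length := by
      split <;> simp
    rw [ih _ _ rs (List.pairwise_cons.mp hp).2
      (fun m hm => ⟨(hb m (by simp [hm])).1, by rw [hlen]; exact (hb m (by simp [hm])).2⟩)]
    simp only [procRow, sub_zero]

lemma procRow_shift (ns : List Int) :
    ∀ (t : Int) (sw : List String) (x : String) (xs : List String),
    (∀ m ∈ ns, t + 1 ≤ m) →
    procRow t sw (x :: xs) ns
      = ((procRow (t + 1) sw xs ns).1, x :: (procRow (t + 1) sw xs ns).2) := by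
  induction ns with
  | nil => intro t sw x xs _; rfl
  | cons n ns ih =>
    intro t sw x xs h
    have hn : t + 1 ≤ n := h n (by simp)
    have hk : (n - t).toNat = (n - (t + 1)).toNat + 1 := by omega
    simp only [procRow, hk, List.getD_cons_succ, List.set_cons_succ]
    by_cases hd : isDot (xs.getD (n - (t + 1)).toNat "")
    · simp only [hd, if_true]
      exact ih t _ x _ (fun m hm => h m (by simp [hm]))
    · simp only [hd, if_false]
      exact ih t _ x _ (fun m hm => h m (by simp [hm]))

lemma procRow_eq (r : List String) :
    ∀ (ns : List Int) (t : Int) (sw : List String),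
    ns.Pairwise (· < ·) → (∀ n ∈ ns, t ≤ n ∧ n < t + r.length) →
    procRow t sw r ns
      = (sw ++ collectRow (fun n => ns.contains n) t r, markRow (fun n => ns.contains n) t r) := by
  induction r with
  | nil =>
    intro ns t sw _ hb
    cases ns with
    | nil => simp [procRow, collectRow, markRow]
    | cons n ns' =>
      exfalso
      have := hb n (by simp)
      simp at this
      omega
  | cons c cs ih =>
    intro ns t sw hp hb
    cases ns with
    | nil =>
      simp only [procRow]
      rw [collectRow_of_false _ _ _ (fun n => by simp),
          markRow_of_false _ _ _ (fun n => by simp)]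
      simp
    | cons n ns' =>
      have hpc := List.pairwise_cons.mp hp
      have hbn := hb n (by simp)
      by_cases hnt : n = t
      · subst hnt
        have hshift : ∀ m ∈ ns', n + 1 ≤ m := fun m hm => by have := hpc.1 m hm; omega
        simp only [procRow, sub_self, Int.toNat_zero, List.getD_cons_zero, List.set_cons_zero]
        -- rewrite the updated row as a cons so procRow_shift applies
        rw [show (if isDot c then "." :: cs else c :: cs) = (if isDot c then "." else c) :: cs from by split <;> rfl]
        rw [procRow_shift ns' n _ _ cs hshift]
        rw [ih ns' (n + 1) _ hpc.2
          (fun m hm => ⟨hshift m hm, by have := (hb m (by simp [hm])).2; simp at this ⊢; omega⟩)]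
        have hcong1 : collectRow (fun m => (n :: ns').contains m) (n + 1) cs
            = collectRow (fun m => ns'.contains m) (n + 1) cs := by
          apply collectRow_congr
          intro m h1 _
          have hmn : m ≠ n := by omega
          simp [List.contains_cons, hmn]
        have hcong2 : markRow (fun m => (n :: ns').contains m) (n + 1) cs
            = markRow (fun m => ns'.contains m) (n + 1) cs := by
          apply markRow_congr
          intro m h1 _
          have hmn : m ≠ n := by omega
          simp [List.contains_cons, hmn]
        simp only [collectRow, markRow, hcong1, hcong2]
        by_cases hs : isSwag c = true <;> by_cases hd : isDot c = true <;>
          simp [hs, hd, List.append_assoc]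
      · have hgt : t + 1 ≤ n := by omega
        have hshift : ∀ m ∈ n :: ns', t + 1 ≤ m := by
          intro m hm
          rcases List.mem_cons.mp hm with h | h
          · omega
          · have := hpc.1 m h; omega
        rw [procRow_shift (n :: ns') t sw c cs hshift]
        rw [ih (n :: ns') (t + 1) sw hp
          (fun m hm => ⟨hshift m hm, by have := (hb m hm).2; simp at this ⊢; omega⟩)]
        have ht1 : t ≠ n := by omega
        have ht2 : t ∉ ns' := fun hmem => by have := hpc.1 t hmem; omega
        simp [collectRow, markRow, ht1, ht2]

lemma sorted_split (l : List Int) (c : Int) (h : l.Pairwise (· < ·)) :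
    l = l.filter (fun n => decide (n < c)) ++ l.filter (fun n => decide (c ≤ n)) := by
  induction l with
  | nil => rfl
  | cons x xs ih =>
    have hx := List.pairwise_cons.mp h
    by_cases hc : x < c
    · simp only [List.filter_cons, decide_eq_true_eq]
      rw [if_pos hc, if_neg (by omega)]
      simpa using ih hx.2
    · have h1 : xs.filter (fun n => decide (n < c)) = [] :=
        List.filter_eq_nil_iff.mpr (fun y hy => by simp; have := hx.1 y hy; omega)
      have h2 : xs.filter (fun n => decide (c ≤ n)) = xs :=
        List.filter_eq_self.mpr (fun y hy => by simp; have := hx.1 y hy; omega)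
      simp only [List.filter_cons, decide_eq_true_eq]
      rw [if_neg hc, if_pos (by omega), h1, h2]
      rfl

lemma B_main (rows : List (List String)) :
    ∀ (ns : List Int) (sw : List String), ns.Pairwise (· < ·) →
    List.foldl pickStep (sw, rows) ns
      = (sw ++ collectAll (fun n => ns.contains n) 0 rows,
         markAll (fun n => ns.contains n) 0 rows) := by
  induction rows with
  | nil => intro ns sw _; rw [foldl_pickStep_nil]; simp [collectAll, markAll]
  | cons r rs ih =>
    intro ns sw hp
    have hsplit1 := sorted_split ns 0 hp
    have hpnp : (ns.filter (fun n => decide (0 ≤ n))).Pairwise (· < ·) := hp.filter _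
    have hsplit2 := sorted_split (ns.filter (fun n => decide (0 ≤ n))) (r.length : Int) hpnp
    have hpnr : ((ns.filter (fun n => decide (0 ≤ n))).filter
        (fun n => decide (n < (r.length : Int)))).Pairwise (· < ·) := hpnp.filter _
    have hbnr : ∀ n ∈ (ns.filter (fun n => decide (0 ≤ n))).filter
        (fun n => decide (n < (r.length : Int))), 0 ≤ n ∧ n < (r.length : Int) := by
      intro n hn
      have h2 := List.mem_filter.mp hn
      have h1 := List.mem_filter.mp h2.1
      simp at h1 h2
      exact ⟨h1.2, h2.2⟩
    have hbnt : ∀ n ∈ (ns.filter (fun n => decide (0 ≤ n))).filter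
        (fun n => decide ((r.length : Int) ≤ n)), (r.length : Int) ≤ n := by
      intro n hn
      have h2 := List.mem_filter.mp hn
      simpa using h2.2
    have hmem_nr : ∀ n, 0 ≤ n → n < (r.length : Int) →
        (((ns.filter (fun n => decide (0 ≤ n))).filter
          (fun n => decide (n < (r.length : Int)))).contains n = ns.contains n) := by
      intro n h0 hlt
      apply contains_eq_contains _ _ n n
      constructor
      · intro hn; exact (List.mem_filter.mp (List.mem_filter.mp hn).1).1
      · intro hn
        exact List.mem_filter.mpr ⟨List.mem_filter.mpr ⟨hn, by simpa using h0⟩, by simpa using hlt⟩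
    have hmem_nt : ∀ m : Int, 0 ≤ m →
        ((((ns.filter (fun n => decide (0 ≤ n))).filter
            (fun n => decide ((r.length : Int) ≤ n))).map
          (fun n => n - (r.length : Int))).contains m = ns.contains (m + (r.length : Int))) := by
      intro m h0
      apply contains_eq_contains _ _ m (m + (r.length : Int))
      constructor
      · intro hm
        obtain ⟨k, hk, hke⟩ := List.mem_map.mp hm
        have hkm : k = m + (r.length : Int) := by omega
        subst hkm
        exact (List.mem_filter.mp (List.mem_filter.mp hk).1).1
      · intro hm
        refine List.mem_map.mpr ⟨m + (r.length : Int), ?_, by ring⟩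
        refine List.mem_filter.mpr ⟨List.mem_filter.mpr ⟨hm, ?_⟩, ?_⟩
        · simp; omega
        · simp; omega
    have hpmap : ((((ns.filter (fun n => decide (0 ≤ n))).filter
        (fun n => decide ((r.length : Int) ≤ n))).map
          (fun n => n - (r.length : Int)))).Pairwise (· < ·) := by
      rw [List.pairwise_map]
      exact (hpnp.filter _).imp (by intro a b hab; omega)
    conv_lhs => rw [hsplit1, List.foldl_append]
    rw [foldl_pickStep_all_neg (ns.filter (fun n => decide (n < 0))) _ (fun n hn => by
      have := List.mem_filter.mp hn; simpa using this.2)]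
    conv_lhs => rw [hsplit2, List.foldl_append]
    rw [foldl_pickStep_row _ sw r rs hpnr hbnr]
    rw [procRow_eq r _ 0 sw hpnr
      (fun n hn => ⟨(hbnr n hn).1, by have := (hbnr n hn).2; omega⟩)]
    dsimp only
    rw [foldl_pickStep_tail _ _ _ rs
      (fun n hn => by rw [markRow_length]; exact hbnt n hn)]
    simp only [markRow_length]
    rw [ih ((((ns.filter (fun n => decide (0 ≤ n))).filter
        (fun n => decide ((r.length : Int) ≤ n))).map
          (fun n => n - (r.length : Int)))) _ hpmap]
    simp only [collectAll, markAll]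
    have e1 : collectRow (fun n => ((ns.filter (fun n => decide (0 ≤ n))).filter
          (fun n => decide (n < (r.length : Int)))).contains n) 0 r
        = collectRow (fun n => ns.contains n) 0 r :=
      collectRow_congr _ _ r 0 (fun n h1 h2 => hmem_nr n h1 (by simpa using h2))
    have e2 : markRow (fun n => ((ns.filter (fun n => decide (0 ≤ n))).filter
          (fun n => decide (n < (r.length : Int)))).contains n) 0 r
        = markRow (fun n => ns.contains n) 0 r :=
      markRow_congr _ _ r 0 (fun n h1 h2 => hmem_nr n h1 (by simpa using h2))
    have e3 : collectAll (fun n => ((((ns.filter (fun n => decide (0 ≤ n))).filter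
          (fun n => decide ((r.length : Int) ≤ n))).map
            (fun n => n - (r.length : Int))).contains n)) 0 rs
        = collectAll (fun n => ns.contains n) (0 + (r.length : Int)) rs := by
      rw [collectAll_shift]
      exact collectAll_congr _ _ rs 0 (fun m h1 => hmem_nt m h1)
    have e4 : markAll (fun n => ((((ns.filter (fun n => decide (0 ≤ n))).filter
          (fun n => decide ((r.length : Int) ≤ n))).map
            (fun n => n - (r.length : Int))).contains n)) 0 rs
        = markAll (fun n => ns.contains n) (0 + (r.length : Int)) rs := by
      rw [markAll_shift]
      exact markAll_congr _ _ rs 0 (fun m h1 => hmem_nt m h1)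
    rw [e1, e2, e3, e4]
    simp [List.append_assoc]

lemma B_char (path : List Int) (grid : List (List String)) :
    track_and_pickup_alt path grid
      = (collectAll (fun n => path.contains n) 0 grid, markAll (fun n => path.contains n) 0 grid) := by
  unfold track_and_pickup_alt
  rw [B_main grid (PySem.List.sorted (PySem.Set.ofList path) (fun x => x)) []
    (PySem.List.sorted_ofList_pairwise_lt _)]
  have hc : (fun n => (PySem.List.sorted (PySem.Set.ofList path) (fun x => x)).contains n)
      = (fun n => path.contains n) := by
    funext n
    exact contains_eq_contains _ _ n n (by rw [PySem.List.mem_sorted, PySem.Set.mem_ofList])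
  rw [hc]
  simp

-- ===== VERDICT (by name: the statement is the Claim_ definition above) =====
theorem track_and_pickup_spec : Claim_equal_track_and_pickup := by
  intro path grid _
  show track_and_pickup path grid = track_and_pickup_alt path grid
  rw [A_char, B_char]
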